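-- pv_equiv track=rewrite | github.com/synarius-project/synarius-core | src/synarius_core/parameters/dcm_io.py | _split_var_funk
-- ===== SOURCE A (Python) =====
-- def _split_var_funk(source_identifier: str) -> tuple[str, str]:
--     var = ""
--     funk = ""
--     for part in str(source_identifier).split(";"):
--         part = part.strip()
--         if part.startswith("VAR="):
--             var = part[4:].strip()
--         elif part.startswith("FUNKTION="):
--             funk = part[9:].strip()
--     return var, funk
-- ===== SOURCE B (Python) =====
-- def _split_var_funk(source_identifier: str) -> tuple[str, str]:
--     result = {}
--     for part in str(source_identifier).split(";"):
--         part = part.strip()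
--         key, sep, value = part.partition("=")
--         if sep:
--             result[key] = value.strip()
--     return result.get("VAR", ""), result.get("FUNKTION", "")
-- ===== Notes on version B (the rewrite author's own statement) =====
-- stated objective: idiomatic
-- what changed: Replaces the two hard-coded startswith prefix branches with a generic key=value table built once via str.partition (un-stripped key, entries only when '=' is present), followed by two dict lookups.
import Mathlib
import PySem

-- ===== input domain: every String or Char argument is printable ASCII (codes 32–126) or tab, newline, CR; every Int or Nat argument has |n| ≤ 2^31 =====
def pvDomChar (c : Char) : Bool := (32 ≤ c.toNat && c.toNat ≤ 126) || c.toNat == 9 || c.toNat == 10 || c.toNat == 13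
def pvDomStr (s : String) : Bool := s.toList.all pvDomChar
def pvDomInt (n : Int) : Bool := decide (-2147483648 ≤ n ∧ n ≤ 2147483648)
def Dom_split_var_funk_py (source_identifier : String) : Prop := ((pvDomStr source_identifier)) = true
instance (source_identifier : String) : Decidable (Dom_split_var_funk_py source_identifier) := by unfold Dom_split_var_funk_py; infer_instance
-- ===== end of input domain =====

-- B replaces A's two hard-coded prefix branches by a generic key=value table built once
-- (str.partition on each stripped part, un-stripped key) followed by two dict lookups;
-- objective: idiomatic (same return value, same O(n) cost).

-- ===== PORT A =====
-- string facts are proved on the List Char side, so both ports work over toList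
def split_var_funk_py (source_identifier : String) : String × String :=
  let r := (PySem.Chars.splitOn source_identifier.toList [';']).foldl
    (fun (acc : List Char × List Char) part =>
      let p := PySem.Chars.strip part
      if PySem.Chars.startswith p ['V','A','R','='] then
        (PySem.Chars.strip (PySem.Chars.slice p (some 4) none), acc.2)
      else if PySem.Chars.startswith p ['F','U','N','K','T','I','O','N','='] then
        (acc.1, PySem.Chars.strip (PySem.Chars.slice p (some 9) none))
      else acc) ([], [])
  (String.ofList r.1, String.ofList r.2)

-- ===== PORT B =====
-- hand port of Python's str.partition('='): exact for this 1-char separator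
-- (split at the FIRST '='; no '=' → (s, "", ""))
def pyPartitionEq : List Char → List Char × List Char × List Char
  | [] => ([], [], [])
  | c :: rest =>
    if c = '=' then ([], ['='], rest)
    else
      let r := pyPartitionEq rest
      (c :: r.1, r.2.1, r.2.2)

def split_var_funk_py_alt (source_identifier : String) : String × String :=
  let d := (PySem.Chars.splitOn source_identifier.toList [';']).foldl
    (fun (d : PySem.Dict (List Char) (List Char)) part =>
      let p := PySem.Chars.strip part
      let r := pyPartitionEq p
      if r.2.1 ≠ [] then d.insert r.1 (PySem.Chars.strip r.2.2) else d)
    PySem.Dict.empty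
  (String.ofList (d.getD ['V','A','R'] []), String.ofList (d.getD ['F','U','N','K','T','I','O','N'] []))

-- ===== PRECONDITION & SPEC =====
def Spec_split_var_funk_py (source_identifier : String) (out : String × String) : Prop := out = split_var_funk_py_alt source_identifier
instance (source_identifier : String) (out : String × String) : Decidable (Spec_split_var_funk_py source_identifier out) := by unfold Spec_split_var_funk_py; infer_instance

-- ===== CLAIM (what is proved, stated in full; the proofs are below) =====
def Claim_equal_split_var_funk_py : Prop := ∀ (source_identifier : String), Dom_split_var_funk_py source_identifier → Spec_split_var_funk_py source_identifier (split_var_funk_py source_identifier)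

-- ===== LEMMAS AND PROOFS =====

-- partition of k ++ '=' :: v with '=' ∉ k finds exactly that split
lemma pyPartitionEq_append (k v : List Char) (h : '=' ∉ k) :
    pyPartitionEq (k ++ '=' :: v) = (k, ['='], v) := by
  induction k with
  | nil => simp [pyPartitionEq]
  | cons c rest ih =>
    have hc : c ≠ '=' := by intro hc; exact h (by simp [hc])
    simp only [List.cons_append, pyPartitionEq, if_neg hc,
      ih (fun hm => h (List.mem_cons_of_mem _ hm))]

-- when the separator component is nonempty it is ['='] and the input is key ++ '=' :: value
lemma pyPartitionEq_sep_ne (cs : List Char) (h : (pyPartitionEq cs).2.1 ≠ []) :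
    (pyPartitionEq cs).2.1 = ['='] ∧
      cs = (pyPartitionEq cs).1 ++ '=' :: (pyPartitionEq cs).2.2 := by
  induction cs with
  | nil => simp [pyPartitionEq] at h
  | cons c rest ih =>
    by_cases hc : c = '='
    · subst hc; simp [pyPartitionEq]
    · simp only [pyPartitionEq, if_neg hc] at h ⊢
      obtain ⟨h1, h2⟩ := ih h
      exact ⟨h1, by rw [List.cons_append, ← h2]⟩

-- one loop step preserves the correspondence between A's pair and B's dict lookups
lemma step_invariant (part : List Char) (d : PySem.Dict (List Char) (List Char))
    (v f : List Char) (hv : d.getD ['V','A','R'] [] = v)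
    (hf : d.getD ['F','U','N','K','T','I','O','N'] [] = f) :
    let p := PySem.Chars.strip part
    let r := pyPartitionEq p
    let d' := if r.2.1 ≠ [] then d.insert r.1 (PySem.Chars.strip r.2.2) else d
    let a := if PySem.Chars.startswith p ['V','A','R','='] then
        (PySem.Chars.strip (PySem.Chars.slice p (some 4) none), f)
      else if PySem.Chars.startswith p ['F','U','N','K','T','I','O','N','='] then
        (v, PySem.Chars.strip (PySem.Chars.slice p (some 9) none))
      else (v, f)
    d'.getD ['V','A','R'] [] = a.1 ∧ d'.getD ['F','U','N','K','T','I','O','N'] [] = a.2 := by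
  intro p r d' a
  by_cases h1 : PySem.Chars.startswith p ['V','A','R','='] = true
  · obtain ⟨t, ht⟩ := (PySem.Chars.startswith_iff p _).mp h1
    have hr : r = (['V','A','R'], ['='], t) := by
      show pyPartitionEq p = _
      rw [← ht]
      exact pyPartitionEq_append ['V','A','R'] t (by decide)
    have hsl : PySem.Chars.slice p (some 4) none = t := by
      show PySem.List.slice p (some 4) none = t
      rw [PySem.List.slice_from p (by norm_num), ← ht]
      rfl
    simp only [a, d', hr, h1, if_pos, hsl]
    refine ⟨?_, ?_⟩
    · simp [PySem.Dict.getD_insert_self]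
    · rw [show (if (['='] : List Char) ≠ [] then
          d.insert ['V','A','R'] (PySem.Chars.strip t) else d)
          = d.insert ['V','A','R'] (PySem.Chars.strip t) from if_pos (by decide)]
      rw [PySem.Dict.getD_insert_of_ne d _ _ (by decide)]
      exact hf
  · by_cases h2 : PySem.Chars.startswith p ['F','U','N','K','T','I','O','N','='] = true
    · obtain ⟨t, ht⟩ := (PySem.Chars.startswith_iff p _).mp h2
      have hr : r = (['F','U','N','K','T','I','O','N'], ['='], t) := by
        show pyPartitionEq p = _
        rw [← ht]
        exact pyPartitionEq_append ['F','U','N','K','T','I','O','N'] t (by decide)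
      have hsl : PySem.Chars.slice p (some 9) none = t := by
        show PySem.List.slice p (some 9) none = t
        rw [PySem.List.slice_from p (by norm_num), ← ht]
        rfl
      simp only [a, d', hr, h1, h2, if_pos, if_neg, hsl, Bool.false_eq_true,
        not_false_eq_true]
      refine ⟨?_, ?_⟩
      · rw [show (if (['='] : List Char) ≠ [] then
            d.insert ['F','U','N','K','T','I','O','N'] (PySem.Chars.strip t) else d)
            = d.insert ['F','U','N','K','T','I','O','N'] (PySem.Chars.strip t) from if_pos (by decide)]
        rw [PySem.Dict.getD_insert_of_ne d _ _ (by decide)]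
        exact hv
      · rw [show (if (['='] : List Char) ≠ [] then
            d.insert ['F','U','N','K','T','I','O','N'] (PySem.Chars.strip t) else d)
            = d.insert ['F','U','N','K','T','I','O','N'] (PySem.Chars.strip t) from if_pos (by decide)]
        simp [PySem.Dict.getD_insert_self]
    · have ha : a = (v, f) := by
        simp only [a, h1, h2, Bool.false_eq_true, if_neg, not_false_eq_true]
      by_cases hs : r.2.1 = []
      · have hd' : d' = d := if_neg (by simp [hs])
        rw [hd', ha]; exact ⟨hv, hf⟩
      · obtain ⟨hsep, hdec⟩ := pyPartitionEq_sep_ne p hs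
        have hkV : r.1 ≠ ['V','A','R'] := by
          intro hk
          apply h1
          rw [(PySem.Chars.startswith_iff p _)]
          refine ⟨r.2.2, ?_⟩
          rw [hdec, hk]; rfl
        have hkF : r.1 ≠ ['F','U','N','K','T','I','O','N'] := by
          intro hk
          apply h2
          rw [(PySem.Chars.startswith_iff p _)]
          refine ⟨r.2.2, ?_⟩
          rw [hdec, hk]; rfl
        have hd' : d' = d.insert r.1 (PySem.Chars.strip r.2.2) := if_pos hs
        rw [hd', ha]
        exact ⟨by rw [PySem.Dict.getD_insert_of_ne d _ _ (Ne.symm hkV)]; exact hv,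
               by rw [PySem.Dict.getD_insert_of_ne d _ _ (Ne.symm hkF)]; exact hf⟩

-- folding the whole parts list preserves the correspondence
lemma fold_invariant (parts : List (List Char)) (d : PySem.Dict (List Char) (List Char))
    (v f : List Char) (hv : d.getD ['V','A','R'] [] = v)
    (hf : d.getD ['F','U','N','K','T','I','O','N'] [] = f) :
    let d' := parts.foldl (fun (d : PySem.Dict (List Char) (List Char)) part =>
      let p := PySem.Chars.strip part
      let r := pyPartitionEq p
      if r.2.1 ≠ [] then d.insert r.1 (PySem.Chars.strip r.2.2) else d) d
    let a := parts.foldl (fun (acc : List Char × List Char) part =>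
      let p := PySem.Chars.strip part
      if PySem.Chars.startswith p ['V','A','R','='] then
        (PySem.Chars.strip (PySem.Chars.slice p (some 4) none), acc.2)
      else if PySem.Chars.startswith p ['F','U','N','K','T','I','O','N','='] then
        (acc.1, PySem.Chars.strip (PySem.Chars.slice p (some 9) none))
      else acc) (v, f)
    d'.getD ['V','A','R'] [] = a.1 ∧ d'.getD ['F','U','N','K','T','I','O','N'] [] = a.2 := by
  induction parts generalizing d v f with
  | nil => exact ⟨hv, hf⟩
  | cons part rest ih =>
    obtain ⟨h1, h2⟩ := step_invariant part d v f hv hf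
    simp only [List.foldl_cons]
    have := ih _ _ _ h1 h2
    convert this using 3

-- ===== VERDICT (by name: the statement is the Claim_ definition above) =====
theorem split_var_funk_py_spec : Claim_equal_split_var_funk_py := by
  intro s _
  show split_var_funk_py s = split_var_funk_py_alt s
  unfold split_var_funk_py split_var_funk_py_alt
  obtain ⟨h1, h2⟩ := fold_invariant (PySem.Chars.splitOn s.toList [';'])
    PySem.Dict.empty [] [] (PySem.Dict.getD_empty _ _) (PySem.Dict.getD_empty _ _)
  simp only at h1 h2 ⊢
  rw [h1, h2]
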